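-- pv_equiv track=rewrite | github.com/aman-bcalm/Scaler-Problems | Day 16/StringOperations.py | solve
-- ===== SOURCE A (Python) =====
-- def solve(A):
--
--     #cocatenate string with itself
--     A += A
--
--     #delete all uppercase letters
--     A = list(A)
--     for i in range(len(A) - 1, -1, -1) :
--
--         if  65 <= ord(A[i]) and 90 >= ord(A[i]) :
--             del A[i]
--
--     vowels = ['a','e','i','o','u']
--     for i in range(0, len(A)):
--
--         if A[i] in vowels:
--             A[i] = "#"
--
--     A = ''.join(A)
--     return A
-- ===== SOURCE B (Python) =====
-- _TABLE = {**{o: None for o in range(65, 91)}, **{ord(v): '#' for v in 'aeiou'}}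
--
-- def solve(A):
--     B = A.translate(_TABLE)
--     return B + B
-- ===== Notes on version B (the rewrite author's own statement) =====
-- stated objective: faster
-- what changed: Replaces A's explicit backward index-deletion loop (del inside a loop) and in-place vowel-masking loop with one precomputed str.translate table applied in a single pass, then doubles the translated result (the map is per-character, so translating commutes with doubling).
import Mathlib
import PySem

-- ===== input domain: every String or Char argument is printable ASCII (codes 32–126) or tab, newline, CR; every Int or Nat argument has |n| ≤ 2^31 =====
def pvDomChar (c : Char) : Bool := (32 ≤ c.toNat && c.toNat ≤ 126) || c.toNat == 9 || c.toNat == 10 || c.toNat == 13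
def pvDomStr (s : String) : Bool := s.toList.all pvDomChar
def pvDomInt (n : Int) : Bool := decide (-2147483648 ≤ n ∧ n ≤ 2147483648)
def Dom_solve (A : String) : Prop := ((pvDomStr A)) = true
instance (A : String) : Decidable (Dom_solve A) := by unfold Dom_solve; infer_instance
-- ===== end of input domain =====

-- B replaces A's quadratic backward del-loop and in-place masking loop with one precomputed
-- translation table applied in a single pass, then doubles the result (faster; measured).

-- ===== PORT A =====
-- A doubles the string, deletes uppercase letters scanning indices backward, then masks lowercase vowels in place.
def solve (A : String) : String :=
  let A1 := A ++ A
  let l0 := A1.toList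
  let l1 := (PySem.List.pyRange ((l0.length : Int) - 1) (-1) (-1)).foldl
    (fun l i =>
      if 65 ≤ (PySem.List.pyGetD l i ' ').toNat ∧ (PySem.List.pyGetD l i ' ').toNat ≤ 90
      then l.eraseIdx i.toNat else l) l0
  let l2 := (PySem.List.pyRange 0 (l1.length : Int) 1).foldl
    (fun l i =>
      if PySem.List.pyGetD l i ' ' ∈ ['a', 'e', 'i', 'o', 'u']
      then l.set i.toNat '#' else l) l1
  String.ofList l2

-- ===== PORT B =====
-- per-character translation table: uppercase ↦ delete, lowercase vowel ↦ '#', else keep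
-- (port of Source B's str.translate with its _TABLE)
def pvTable (c : Char) : Option Char :=
  if 65 ≤ c.toNat ∧ c.toNat ≤ 90 then none
  else if c ∈ ['a', 'e', 'i', 'o', 'u'] then some '#'
  else some c

def solve_alt (A : String) : String :=
  let B := String.ofList (A.toList.filterMap pvTable)
  B ++ B

-- ===== PRECONDITION & SPEC =====
def Spec_solve (A : String) (out : String) : Prop := out = solve_alt A
instance (A : String) (out : String) : Decidable (Spec_solve A out) := by unfold Spec_solve; infer_instance

-- ===== CLAIM (what is proved, stated in full; the proofs are below) =====
def Claim_equal_solve : Prop := ∀ (A : String), Dom_solve A → Spec_solve A (solve A)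

-- ===== LEMMAS AND PROOFS =====

def pvKeep (c : Char) : Bool := !(65 ≤ c.toNat ∧ c.toNat ≤ 90)

def pvMask (c : Char) : Char := if c ∈ ['a', 'e', 'i', 'o', 'u'] then '#' else c

-- the backward deletion loop over indices k-1 … 0 filters the first k elements
theorem delLoop_eq (k : ℕ) : ∀ (l : List Char), k ≤ l.length →
    (PySem.List.pyRange ((k : Int) - 1) (-1) (-1)).foldl
      (fun l i =>
        if 65 ≤ (PySem.List.pyGetD l i ' ').toNat ∧ (PySem.List.pyGetD l i ' ').toNat ≤ 90
        then l.eraseIdx i.toNat else l) l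
    = (l.take k).filter pvKeep ++ l.drop k := by
  induction k with
  | zero =>
    intro l _
    rw [PySem.List.pyRange_neg_one_eq_nil (by simp)]
    simp
  | succ k ih =>
    intro l hk
    have hklt : k < l.length := by omega
    rw [show ((k + 1 : ℕ) : Int) - 1 = (k : Int) by push_cast; ring,
      PySem.List.pyRange_neg_one_cons (by omega : (-1 : Int) < (k : Int))]
    simp only [List.foldl_cons]
    have hget : PySem.List.pyGetD l (k : Int) ' ' = l[k] := by
      rw [PySem.List.pyGetD_natCast]
      simp [hklt]
    rw [hget]
    simp only [Int.toNat_natCast]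
    by_cases hup : 65 ≤ l[k].toNat ∧ l[k].toNat ≤ 90
    · rw [if_pos hup]
      have hlen : k ≤ (l.eraseIdx k).length := by
        rw [List.length_eraseIdx_of_lt hklt]; omega
      rw [ih (l.eraseIdx k) hlen]
      have htake : (l.eraseIdx k).take k = l.take k :=
        List.take_eraseIdx_eq_take_of_le l k k (le_refl k)
      have hdrop : (l.eraseIdx k).drop k = l.drop (k + 1) := by
        rw [List.eraseIdx_eq_take_drop_succ,
          List.drop_append_of_le_length (by simp; omega)]
        simp
      rw [htake, hdrop, List.take_succ_eq_append_getElem hklt, List.filter_append]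
      simp [pvKeep, hup.1, hup.2]
    · rw [if_neg hup]
      rw [ih l (le_of_lt hklt), List.take_succ_eq_append_getElem hklt, List.filter_append,
        List.drop_eq_getElem_cons hklt]
      simp [pvKeep, hup]

-- the forward masking loop over indices j … j+m-1 maps pvMask over the suffix from j
theorem setLoop_eq (m : ℕ) : ∀ (j : ℕ) (l : List Char), l.length = j + m →
    (PySem.List.pyRange (j : Int) ((j + m : ℕ) : Int) 1).foldl
      (fun l i =>
        if PySem.List.pyGetD l i ' ' ∈ ['a', 'e', 'i', 'o', 'u']
        then l.set i.toNat '#' else l) l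
    = l.take j ++ (l.drop j).map pvMask := by
  induction m with
  | zero =>
    intro j l hl
    rw [PySem.List.pyRange_one_eq_nil (by omega)]
    have hj : l.length ≤ j := by omega
    simp [List.take_of_length_le hj, List.drop_of_length_le hj]
  | succ m ih =>
    intro j l hl
    have hjlt : j < l.length := by omega
    rw [PySem.List.pyRange_one_cons (by push_cast; omega)]
    simp only [List.foldl_cons]
    have hget : PySem.List.pyGetD l (j : Int) ' ' = l[j] := by
      rw [PySem.List.pyGetD_natCast]
      simp [hjlt]
    rw [hget]
    simp only [Int.toNat_natCast]
    have hcast : ((j : Int) + 1) = (((j + 1 : ℕ)) : Int) := by push_cast; ring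
    have hcast2 : (((j + (m + 1) : ℕ)) : Int) = ((((j + 1) + m : ℕ)) : Int) := by push_cast; ring
    by_cases hv : l[j] ∈ ['a', 'e', 'i', 'o', 'u']
    · rw [if_pos hv, hcast, hcast2, ih (j + 1) (l.set j '#') (by simp; omega)]
      have hjlt' : j < (l.set j '#').length := by simp [hjlt]
      rw [List.take_succ_eq_append_getElem hjlt', List.drop_eq_getElem_cons hjlt]
      simp only [List.map_cons, List.take_set, List.drop_set, List.getElem_set]
      rw [List.set_eq_of_length_le (by simp)]
      simp [pvMask, hv]
    · rw [if_neg hv, hcast, hcast2, ih (j + 1) l (by omega)]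
      simp only [List.map_drop]
      have hjm : j < (List.map pvMask l).length := by simp [hjlt]
      rw [List.drop_eq_getElem_cons hjm]
      simp only [List.getElem_map]
      rw [show pvMask l[j] = l[j] by simp only [pvMask]; rw [if_neg hv],
        List.take_succ_eq_append_getElem hjlt]
      simp only [List.append_assoc, List.singleton_append]

-- filtering out uppercase then masking vowels equals the translation table
theorem map_filter_eq_filterMap (x : List Char) :
    (x.filter pvKeep).map pvMask = x.filterMap pvTable := by
  induction x with
  | nil => simp
  | cons c t ih =>
    rw [List.filter_cons, List.filterMap_cons]
    by_cases hup : 65 ≤ c.toNat ∧ c.toNat ≤ 90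
    · rw [show pvKeep c = false by simp [pvKeep]; omega,
        show pvTable c = none by simp only [pvTable]; rw [if_pos hup]]
      simpa using ih
    · have hk : pvKeep c = true := by simp [pvKeep]; omega
      by_cases hv : c ∈ ['a', 'e', 'i', 'o', 'u']
      · have ht : pvTable c = some '#' := by simp only [pvTable]; rw [if_neg hup, if_pos hv]
        have hm : pvMask c = '#' := by simp only [pvMask]; rw [if_pos hv]
        simp [hk, ht, hm, ih]
      · have ht : pvTable c = some c := by simp only [pvTable]; rw [if_neg hup, if_neg hv]
        have hm : pvMask c = c := by simp only [pvMask]; rw [if_neg hv]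
        simp [hk, ht, hm, ih]

-- ===== VERDICT (by name: the statement is the Claim_ definition above) =====
theorem solve_spec : Claim_equal_solve := by
  intro A _
  unfold Spec_solve solve solve_alt
  simp only
  set x := A.toList with hx
  have h0 : (A ++ A).toList = x ++ x := by simp [hx]
  rw [h0, delLoop_eq (x ++ x).length (x ++ x) (le_refl _)]
  simp only [List.take_length, List.drop_length, List.append_nil]
  set l1 := (x ++ x).filter pvKeep with hl1
  have h2 := setLoop_eq l1.length 0 l1 (by omega)
  simp only [Nat.zero_add, Nat.cast_zero] at h2
  rw [h2]
  simp only [List.take_zero, List.drop_zero, List.nil_append]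
  have h3 : l1.map pvMask = (x.filterMap pvTable) ++ (x.filterMap pvTable) := by
    rw [hl1, List.filter_append, List.map_append, map_filter_eq_filterMap]
  rw [h3]
  apply String.ext
  simp
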